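-- pv_equiv track=rewrite | github.com/protti/FeatTS | utilityUCR.py | getListOfIndex
-- ===== SOURCE A (Python) =====
-- def getListOfIndex(listOfRep):
--     listOfEmptySpace = []
--     listOfRepCop = list()
--
--     for value in listOfRep:
--         listOfRepCop.append(value)
--
--     for index in range(0,len(listOfRepCop)):
--         if listOfRepCop.count(listOfRepCop[index]) > 1:
--             listOfEmptySpace.append(index)
--             listOfRepCop[index] =  -1
--     return listOfEmptySpace
-- ===== SOURCE B (Python) =====
-- def getListOfIndex(listOfRep):
--     last = {}
--     for i, v in enumerate(listOfRep):
--         last[v] = i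
--     return [i for i, v in enumerate(listOfRep) if last[v] != i]
-- ===== Notes on version B (the rewrite author's own statement) =====
-- stated objective: faster
-- what changed: Replaces the quadratic recount-and-tombstone loop over a mutated copy by a single pass that precomputes each value's last-occurrence index in a dict and keeps exactly the indices that are not the last occurrence of their value.
-- intended difference: On lists where -1 occurs at least twice, or occurs once after an index whose value recurs later, A's -1 tombstone sentinel collides with the genuine -1 values and A also returns the index of the last -1 even though it is the last occurrence of its value; B returns exactly the non-last-occurrence indices, which is the intended result. — e.g. on getListOfIndex([-1, -1]): A returns [0, 1], B returns [0]
import Mathlib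
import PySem

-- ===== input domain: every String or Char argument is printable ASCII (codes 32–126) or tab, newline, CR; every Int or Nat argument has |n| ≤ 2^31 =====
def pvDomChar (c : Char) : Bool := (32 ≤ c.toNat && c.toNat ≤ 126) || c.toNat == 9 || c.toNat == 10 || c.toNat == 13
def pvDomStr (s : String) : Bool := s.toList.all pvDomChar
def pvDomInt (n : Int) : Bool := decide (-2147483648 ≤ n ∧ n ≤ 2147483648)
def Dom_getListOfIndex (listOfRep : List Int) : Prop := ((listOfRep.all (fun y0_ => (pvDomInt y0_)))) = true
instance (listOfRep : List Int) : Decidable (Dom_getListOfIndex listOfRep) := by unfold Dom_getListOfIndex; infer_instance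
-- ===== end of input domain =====

-- B replaces A's quadratic recount-and-tombstone loop by a single pass over a precomputed last-occurrence dict (measured faster); on lists where genuine -1 values collide with A's -1 tombstone sentinel A also returns the last -1's index, stated as the intended difference D_ below.


-- ===== PORT A =====
def getListOfIndex (listOfRep : List Int) : List Int :=
  let listOfEmptySpace : List Int := []
  let listOfRepCop := listOfRep.foldl (fun acc value => acc ++ [value]) []
  let st :=
    (PySem.List.pyRange 0 (PySem.List.len listOfRepCop) 1).foldl
      (fun (st : List Int × List Int) index =>
        if PySem.List.count st.2 (PySem.List.pyGetD st.2 index 0) > 1 then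
          (st.1 ++ [index], PySem.List.pySetD st.2 index (-1))
        else st)
      (listOfEmptySpace, listOfRepCop)
  st.1

-- ===== PORT B =====
def getListOfIndex_alt (listOfRep : List Int) : List Int :=
  let last :=
    (PySem.List.enumerate listOfRep).foldl
      (fun (d : PySem.Dict Int Int) iv => d.insert iv.2 iv.1) PySem.Dict.empty
  (PySem.List.enumerate listOfRep).foldl
    (fun acc iv => if PySem.Dict.getD last iv.2 0 ≠ iv.1 then acc ++ [iv.1] else acc) []

-- ===== PRECONDITION & SPEC =====
-- On lists where -1 occurs at least twice, or occurs exactly once after an index whose value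
-- recurs later, A's -1 tombstone sentinel collides with the genuine -1 values and A also returns
-- the index of the last -1 even though it is the last occurrence of its value; B returns exactly
-- the non-last-occurrence indices, which is the intended result.
def D_getListOfIndex (listOfRep : List Int) : Prop :=
  2 ≤ listOfRep.count (-1) ∨
    (listOfRep.count (-1) = 1 ∧
      ∃ i < listOfRep.length, ∃ j < listOfRep.length,
        i < j ∧ listOfRep.getD i 0 = listOfRep.getD j 0 ∧ i < listOfRep.idxOf (-1))
instance (listOfRep : List Int) : Decidable (D_getListOfIndex listOfRep) := by
  unfold D_getListOfIndex; infer_instance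

def Spec_getListOfIndex (listOfRep : List Int) (out : List Int) : Prop :=
  ¬ D_getListOfIndex listOfRep → out = getListOfIndex_alt listOfRep
instance (listOfRep : List Int) (out : List Int) : Decidable (Spec_getListOfIndex listOfRep out) := by
  unfold Spec_getListOfIndex; infer_instance

def pvDiffWitness_getListOfIndex : List Int := [-1, -1]
def pvDiffWitnessOut_getListOfIndex : (List Int) × (List Int) := ([0, 1], [0])

-- ===== CLAIM (what is proved, stated in full; the proofs are below) =====
def Claim_unchanged_getListOfIndex : Prop := ∀ (listOfRep : List Int), Dom_getListOfIndex listOfRep → Spec_getListOfIndex listOfRep (getListOfIndex listOfRep)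
def Claim_changed_getListOfIndex : Prop := Dom_getListOfIndex (pvDiffWitness_getListOfIndex) ∧ D_getListOfIndex (pvDiffWitness_getListOfIndex) ∧ getListOfIndex (pvDiffWitness_getListOfIndex) = pvDiffWitnessOut_getListOfIndex.1 ∧ getListOfIndex_alt (pvDiffWitness_getListOfIndex) = pvDiffWitnessOut_getListOfIndex.2 ∧ pvDiffWitnessOut_getListOfIndex.1 ≠ pvDiffWitnessOut_getListOfIndex.2
def Claim_exact_getListOfIndex : Prop := ∀ (listOfRep : List Int), Dom_getListOfIndex listOfRep → D_getListOfIndex listOfRep → getListOfIndex listOfRep ≠ getListOfIndex_alt listOfRep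

-- ===== LEMMAS AND PROOFS =====

-- A's loop body, and a proof-side one-pass characterisation of A with running counters
def stepA (st : List Int × List Int) (index : Int) : List Int × List Int :=
  if PySem.List.count st.2 (PySem.List.pyGetD st.2 index 0) > 1 then
    (st.1 ++ [index], PySem.List.pySetD st.2 index (-1))
  else st

def stepC (last : PySem.Dict Int Int) (totalNeg : Int) (st : List Int × Int × Int)
    (iv : Int × Int) : List Int × Int × Int :=
  if iv.2 = -1 then
    if PySem.List.len st.1 + st.2.1 + (totalNeg - st.2.2) > 1 then
      (st.1 ++ [iv.1], st.2.1, st.2.2 + 1)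
    else
      (st.1, st.2.1 + 1, st.2.2 + 1)
  else
    if PySem.Dict.getD last iv.2 0 ≠ iv.1 then (st.1 ++ [iv.1], st.2)
    else st

-- B's loop body
def stepN (last : PySem.Dict Int Int) (acc : List Int) (iv : Int × Int) : List Int :=
  if PySem.Dict.getD last iv.2 0 ≠ iv.1 then acc ++ [iv.1] else acc

def lastD (xs : List Int) : PySem.Dict Int Int :=
  (PySem.List.enumerate xs 0).foldl (fun d iv => d.insert iv.2 iv.1) PySem.Dict.empty

lemma altB (xs : List Int) :
    getListOfIndex_alt xs = (PySem.List.enumerate xs 0).foldl (stepN (lastD xs)) [] := rfl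

lemma dict_fold_not_mem (t : List Int) : ∀ (s : Int) (d : PySem.Dict Int Int) (v : Int),
    v ∉ t →
    ((PySem.List.enumerate t s).foldl (fun d iv => d.insert iv.2 iv.1) d).get? v = d.get? v := by
  induction t with
  | nil => intro s d v _; simp [PySem.List.enumerate_nil]
  | cons x t ih =>
    intro s d v hv
    rw [PySem.List.enumerate_cons, List.foldl_cons]
    rw [ih (s+1) _ v (by simp at hv; exact hv.2)]
    exact PySem.Dict.get?_insert_of_ne d s (by simp at hv; exact hv.1)

lemma dict_fold_last (t : List Int) : ∀ (s : Int) (d : PySem.Dict Int Int) (v : Int) (k : Nat),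
    k < t.length → t.getD k 0 = v →
    (∀ m : Nat, k < m → m < t.length → t.getD m 0 ≠ v) →
    ((PySem.List.enumerate t s).foldl (fun d iv => d.insert iv.2 iv.1) d).getD v 0 = s + k := by
  induction t with
  | nil => intro s d v k hk; simp at hk
  | cons x t ih =>
    intro s d v k hk hkv hlast
    rw [PySem.List.enumerate_cons, List.foldl_cons]
    cases k with
    | zero =>
      simp at hkv
      subst hkv
      have hnot : x ∉ t := by
        intro hmem
        obtain ⟨j, hj, hjv⟩ := List.getElem_of_mem hmem
        exact hlast (j+1) (by omega) (by simpa using hj)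
          (by simp [List.getD_cons_succ, List.getD_eq_getElem?_getD, hj, hjv])
      rw [PySem.Dict.getD_eq_get?_getD, dict_fold_not_mem t (s+1) _ x hnot,
        PySem.Dict.get?_insert_self]
      simp
    | succ k =>
      rw [ih (s+1) _ v k (by simpa using hk) (by simpa using hkv)
        (fun m hm hmlen => by
          have := hlast (m+1) (by omega) (by simpa using hmlen)
          simpa using this)]
      push_cast; ring

lemma exists_last_occ (t : List Int) (v : Int) (hv : v ∈ t) :
    ∃ k : Nat, k < t.length ∧ t.getD k 0 = v ∧
      ∀ m : Nat, k < m → m < t.length → t.getD m 0 ≠ v := by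
  classical
  set P : Nat → Prop := fun m => m < t.length ∧ t.getD m 0 = v with hP
  obtain ⟨j, hj, hjv⟩ := List.getElem_of_mem hv
  have hPj : P j := ⟨hj, by simp [List.getD_eq_getElem?_getD, hj, hjv]⟩
  have hspec : P (Nat.findGreatest P t.length) :=
    Nat.findGreatest_spec (m := j) (by omega) hPj
  refine ⟨Nat.findGreatest P t.length, hspec.1, hspec.2, ?_⟩
  intro m hm hmlen hmv
  exact Nat.findGreatest_is_greatest hm (by omega) ⟨hmlen, hmv⟩

lemma getD_append_len (P t' : List Int) (x d : Int) : (P ++ x :: t').getD P.length d = x := by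
  simp [List.getD_eq_getElem?_getD, List.getElem?_append_right]

lemma setD_append_len (P t' : List Int) (x v : Int) :
    PySem.List.pySetD (P ++ x :: t') (P.length : Int) v = P ++ v :: t' := by
  simp [PySem.List.pySetD, PySem.List.pySet?, PySem.List.pyIdx?]

-- shift of the last-occurrence characterisation by one position
lemma hlast_shift (last : PySem.Dict Int Int) (x : Int) (t' : List Int) (n : Int)
    (h : ∀ j : Nat, j < (x :: t').length → (x :: t').getD j 0 ≠ -1 →
      (last.getD ((x :: t').getD j 0) 0 = n + (j : Int) ↔
        ∀ m : Nat, j < m → m < (x :: t').length → (x :: t').getD m 0 ≠ (x :: t').getD j 0)) :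
    ∀ j : Nat, j < t'.length → t'.getD j 0 ≠ -1 →
      (last.getD (t'.getD j 0) 0 = (n + 1) + (j : Int) ↔
        ∀ m : Nat, j < m → m < t'.length → t'.getD m 0 ≠ t'.getD j 0) := by
  intro j hj hjv
  have h' := h (j+1) (by simpa using hj) (by simpa using hjv)
  simp only [List.getD_cons_succ] at h'
  have hcast : n + ((j : Int) + 1) = (n + 1) + (j : Int) := by ring
  rw [show ((j+1 : Nat) : Int) = (j : Int) + 1 by push_cast; ring, hcast] at h'
  rw [h']
  constructor
  · intro hall m hm hmlen
    have := hall (m+1) (by omega) (by simpa using hmlen)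
    simpa using this
  · intro hall m hm hmlen
    cases m with
    | zero => omega
    | succ m => simpa using hall m (by omega) (by simpa using hmlen)

lemma main_inv (last : PySem.Dict Int Int) (totalNeg : Int) (t : List Int) :
    ∀ (s : Int) (P r : List Int) (u b : Int),
    s = (P.length : Int) →
    (∀ v : Int, v ≠ -1 → v ∈ t → P.count v = 0) →
    ((P.count (-1) : Int) = (r.length : Int) + u) →
    (totalNeg - b = (t.count (-1) : Int)) →
    (∀ j : Nat, j < t.length → t.getD j 0 ≠ -1 →
      (last.getD (t.getD j 0) 0 = s + (j : Int) ↔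
        ∀ m : Nat, j < m → m < t.length → t.getD m 0 ≠ t.getD j 0)) →
    ((PySem.List.pyRange s (s + (t.length : Int)) 1).foldl stepA (r, P ++ t)).1
      = ((PySem.List.enumerate t s).foldl (stepC last totalNeg) (r, u, b)).1 := by
  induction t with
  | nil =>
    intro s P r u b hs h2 h3 h4 hlast
    rw [PySem.List.pyRange_one_eq_nil (by simp)]
    simp [PySem.List.enumerate_nil]
  | cons x t' ih =>
    intro s P r u b hs h2 h3 h4 hlast
    have hend : s + ((x :: t').length : Int) = (s + 1) + (t'.length : Int) := by
      push_cast [List.length_cons]; ring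
    rw [hend, PySem.List.pyRange_one_cons (by push_cast [List.length_cons]; omega), List.foldl_cons,
      PySem.List.enumerate_cons, List.foldl_cons]
    have hcur : PySem.List.pyGetD (P ++ x :: t') s 0 = x := by
      rw [hs, PySem.List.pyGetD_natCast, getD_append_len]
    have hlast' := hlast_shift last x t' s hlast
    by_cases hx1 : x = -1
    · subst hx1
      have hcntA : PySem.List.count (P ++ -1 :: t') (-1) = P.count (-1) + (t'.count (-1) + 1) := by
        simp [PySem.List.count_eq, List.count_append]
      have hcnt4 : totalNeg - b = ((t'.count (-1) : Int) + 1) := by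
        rw [h4]; simp
      have hcondiff : (PySem.List.count (P ++ -1 :: t') (PySem.List.pyGetD (P ++ -1 :: t') s 0) > 1)
          ↔ (PySem.List.len r + u + (totalNeg - b) > 1) := by
        rw [hcur, hcntA, PySem.List.len_eq, hcnt4]
        push_cast at h3 ⊢
        omega
      by_cases hc : PySem.List.len r + u + (totalNeg - b) > 1
      · rw [show stepA (r, P ++ -1 :: t') s = (r ++ [s], P ++ -1 :: t') from by
            dsimp only [stepA]; rw [if_pos (hcondiff.mpr hc)]
            rw [hs]; rw [setD_append_len],
          show stepC last totalNeg (r, u, b) (s, -1) = (r ++ [s], u, b + 1) from by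
            simp [stepC]; simp only [PySem.List.len_eq] at hc; omega]
        have := ih (s+1) (P ++ [-1]) (r ++ [s]) u (b+1)
          (by simp [hs])
          (fun v hv hvt => by
            rw [List.count_append]
            simp [List.count_singleton, hv, h2 v hv (List.mem_cons_of_mem _ hvt)]
            omega)
          (by rw [List.count_append]; push_cast at h3 ⊢; simp; omega)
          (by push_cast at hcnt4 ⊢; omega)
          hlast'
        rw [show P ++ -1 :: t' = (P ++ [-1]) ++ t' from by simp]
        exact this
      · rw [show stepA (r, P ++ -1 :: t') s = (r, P ++ -1 :: t') from by
            dsimp only [stepA]; rw [if_neg (fun h => hc (hcondiff.mp h))],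
          show stepC last totalNeg (r, u, b) (s, -1) = (r, u + 1, b + 1) from by
            simp [stepC]; simp only [PySem.List.len_eq] at hc; omega]
        have := ih (s+1) (P ++ [-1]) r (u+1) (b+1)
          (by simp [hs])
          (fun v hv hvt => by
            rw [List.count_append]
            simp [List.count_singleton, hv, h2 v hv (List.mem_cons_of_mem _ hvt)]
            omega)
          (by rw [List.count_append]; push_cast at h3 ⊢; simp; omega)
          (by push_cast at hcnt4 ⊢; omega)
          hlast'
        rw [show P ++ -1 :: t' = (P ++ [-1]) ++ t' from by simp]
        exact this
    · have hPx : P.count x = 0 := h2 x hx1 (List.mem_cons_self)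
      have hcntA : PySem.List.count (P ++ x :: t') x = t'.count x + 1 := by
        simp [PySem.List.count_eq, List.count_append, hPx]
      have hcondA : (PySem.List.count (P ++ x :: t') (PySem.List.pyGetD (P ++ x :: t') s 0) > 1)
          ↔ x ∈ t' := by
        rw [hcur, hcntA]
        constructor
        · intro h; exact List.count_pos_iff.mp (by omega)
        · intro h; have := List.count_pos_iff.mpr h; omega
      have hnotin : (∀ m : Nat, 0 < m → m < (x :: t').length → (x :: t').getD m 0 ≠ x)
          ↔ x ∉ t' := by
        constructor
        · intro hall hmem
          obtain ⟨j, hj, hjv⟩ := List.getElem_of_mem hmem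
          exact hall (j+1) (by omega) (by simpa using hj)
            (by simp [List.getD_eq_getElem?_getD, hj, hjv])
        · intro hnm m hm hmlen
          cases m with
          | zero => omega
          | succ m =>
            simp only [List.getD_cons_succ]
            intro heq
            apply hnm
            rw [← heq]
            have hm' : m < t'.length := by simpa using hmlen
            simp [List.getD_eq_getElem?_getD, hm']
      have h0 := hlast 0 (by simp) (by simpa using hx1)
      simp only [List.getD_cons_zero, Nat.cast_zero, add_zero] at h0
      have hcondB : (PySem.Dict.getD last x 0 ≠ s) ↔ x ∈ t' := by
        rw [show (PySem.Dict.getD last x 0 ≠ s) ↔ ¬ (PySem.Dict.getD last x 0 = s) from Iff.rfl]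
        rw [h0, hnotin]
        simp
      by_cases hmem : x ∈ t'
      · rw [show stepA (r, P ++ x :: t') s = (r ++ [s], P ++ -1 :: t') from by
            dsimp only [stepA]; rw [if_pos (hcondA.mpr hmem)]
            rw [hs]; rw [setD_append_len],
          show stepC last totalNeg (r, u, b) (s, x) = (r ++ [s], u, b) from by
            simp [stepC, hx1, hcondB.mpr hmem]]
        have := ih (s+1) (P ++ [-1]) (r ++ [s]) u b
          (by simp [hs])
          (fun v hv hvt => by
            rw [List.count_append]
            simp [List.count_singleton, hv, h2 v hv (List.mem_cons_of_mem _ hvt)]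
            omega)
          (by rw [List.count_append]; push_cast at h3 ⊢; simp; omega)
          (by rw [h4]; simp [List.count_cons, hx1])
          hlast'
        rw [show P ++ -1 :: t' = (P ++ [-1]) ++ t' from by simp]
        exact this
      · rw [show stepA (r, P ++ x :: t') s = (r, P ++ x :: t') from by
            dsimp only [stepA]; rw [if_neg (fun h => hmem (hcondA.mp h))],
          show stepC last totalNeg (r, u, b) (s, x) = (r, u, b) from by
            simp [stepC, hx1, show ¬ (PySem.Dict.getD last x 0 ≠ s) from fun h => hmem (hcondB.mp h)]]
        have := ih (s+1) (P ++ [x]) r u b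
          (by simp [hs])
          (fun v hv hvt => by
            rw [List.count_append]
            have : x ≠ v := fun h => hmem (h ▸ hvt)
            simp [List.count_singleton, h2 v hv (List.mem_cons_of_mem _ hvt), this])
          (by rw [List.count_append]; push_cast at h3 ⊢; simp [hx1]; omega)
          (by rw [h4]; simp [List.count_cons, hx1])
          hlast'
        rw [show P ++ x :: t' = (P ++ [x]) ++ t' from by simp]
        exact this

lemma hlast_top (xs : List Int) :
    ∀ j : Nat, j < xs.length → xs.getD j 0 ≠ -1 →
      ((lastD xs).getD (xs.getD j 0) 0 = 0 + (j : Int) ↔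
        ∀ m : Nat, j < m → m < xs.length → xs.getD m 0 ≠ xs.getD j 0) := by
  intro j hj hjv
  have hvmem : xs.getD j 0 ∈ xs := by
    simp [List.getD_eq_getElem?_getD, hj]
  obtain ⟨k, hk, hkv, hklast⟩ := exists_last_occ xs (xs.getD j 0) hvmem
  have hget := dict_fold_last xs 0 PySem.Dict.empty (xs.getD j 0) k hk hkv hklast
  rw [show lastD xs = (PySem.List.enumerate xs 0).foldl (fun d iv => d.insert iv.2 iv.1) PySem.Dict.empty from rfl, hget]
  constructor
  · intro h
    have : k = j := by omega
    subst this
    exact hklast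
  · intro hall
    have hjk : ¬ (k < j) := fun hlt => hklast j hlt hj rfl
    have : k = j := by
      rcases Nat.lt_or_ge j k with hlt | hge
      · exact absurd hkv (hall k hlt hk)
      · omega
    rw [this]

-- A equals the proof-side one-pass characterisation with counters
lemma A_char (xs : List Int) :
    getListOfIndex xs
      = ((PySem.List.enumerate xs 0).foldl (stepC (lastD xs) ((xs.count (-1) : Int))) ([], 0, 0)).1 := by
  have hcopy : List.foldl (fun acc (value : Int) => acc ++ [value]) [] xs = xs := by
    rw [PySem.List.foldl_append_singleton_eq_self]; simp
  have hA : getListOfIndex xs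
      = ((PySem.List.pyRange 0 (PySem.List.len xs) 1).foldl stepA ([], xs)).1 := by
    show ((PySem.List.pyRange 0 (PySem.List.len (List.foldl (fun acc value => acc ++ [value]) [] xs)) 1).foldl
        stepA ([], List.foldl (fun acc value => acc ++ [value]) [] xs)).1
      = ((PySem.List.pyRange 0 (PySem.List.len xs) 1).foldl stepA ([], xs)).1
    rw [hcopy]
  rw [hA]
  have := main_inv (lastD xs) ((xs.count (-1) : Int)) xs 0 [] [] 0 0
    (by simp) (by simp) (by simp) (by simp)
    (by simpa using hlast_top xs)
  simpa [PySem.List.len_eq] using this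

-- on a -1-free segment, the counter fold and B's fold make the same appends
lemma seg (last : PySem.Dict Int Int) (tn : Int) (t : List Int) :
    ∀ (s : Int) (r : List Int) (u b : Int), (∀ v ∈ t, v ≠ -1) →
    ((PySem.List.enumerate t s).foldl (stepC last tn) (r, u, b)).1
      = (PySem.List.enumerate t s).foldl (stepN last) r := by
  induction t with
  | nil => intro s r u b _; simp [PySem.List.enumerate_nil]
  | cons x t ih =>
    intro s r u b hv
    rw [PySem.List.enumerate_cons, List.foldl_cons, List.foldl_cons]
    have hx : x ≠ -1 := hv x (List.mem_cons_self)
    by_cases hc : PySem.Dict.getD last x 0 ≠ s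
    · rw [show stepC last tn (r, u, b) (s, x) = (r ++ [s], u, b) from by simp [stepC, hx, hc],
        show stepN last r (s, x) = r ++ [s] from by simp [stepN, hc]]
      exact ih (s+1) (r ++ [s]) u b (fun v h => hv v (List.mem_cons_of_mem _ h))
    · rw [show stepC last tn (r, u, b) (s, x) = (r, u, b) from by simp [stepC, hx, hc],
        show stepN last r (s, x) = r from by simp [stepN, hc]]
      exact ih (s+1) r u b (fun v h => hv v (List.mem_cons_of_mem _ h))

-- on a segment where every element's last occurrence is its own index, nothing happens
lemma noappC (last : PySem.Dict Int Int) (tn : Int) (t : List Int) :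
    ∀ (s : Int) (st : List Int × Int × Int),
    (∀ j : Nat, j < t.length → t.getD j 0 ≠ -1 ∧ PySem.Dict.getD last (t.getD j 0) 0 = s + (j : Int)) →
    (PySem.List.enumerate t s).foldl (stepC last tn) st = st := by
  induction t with
  | nil => intro s st _; simp [PySem.List.enumerate_nil]
  | cons x t ih =>
    intro s st h
    obtain ⟨hx, hgx⟩ := h 0 (by simp)
    simp only [List.getD_cons_zero, Nat.cast_zero, add_zero] at hx hgx
    rw [PySem.List.enumerate_cons, List.foldl_cons,
      show stepC last tn st (s, x) = st from by simp [stepC, hx, hgx]]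
    apply ih (s+1)
    intro j hj
    have := h (j+1) (by simpa using hj)
    simp only [List.getD_cons_succ] at this
    refine ⟨this.1, ?_⟩
    rw [this.2]; push_cast; ring

lemma noappN (last : PySem.Dict Int Int) (t : List Int) :
    ∀ (s : Int) (r : List Int),
    (∀ j : Nat, j < t.length → PySem.Dict.getD last (t.getD j 0) 0 = s + (j : Int)) →
    (PySem.List.enumerate t s).foldl (stepN last) r = r := by
  induction t with
  | nil => intro s r _; simp [PySem.List.enumerate_nil]
  | cons x t ih =>
    intro s r h
    have hgx := h 0 (by simp)
    simp only [List.getD_cons_zero, Nat.cast_zero, add_zero] at hgx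
    rw [PySem.List.enumerate_cons, List.foldl_cons,
      show stepN last r (s, x) = r from by simp [stepN, hgx]]
    apply ih (s+1)
    intro j hj
    have := h (j+1) (by simpa using hj)
    simp only [List.getD_cons_succ] at this
    rw [this]; push_cast; ring

-- split off the last -1, and (for a unique -1) the first -1
lemma split_last (xs : List Int) (h : (-1 : Int) ∈ xs) :
    ∃ p q : List Int, xs = p ++ (-1) :: q ∧ (-1 : Int) ∉ q := by
  induction xs with
  | nil => simp at h
  | cons x t ih =>
    by_cases ht : (-1 : Int) ∈ t
    · obtain ⟨p, q, hpq, hq⟩ := ih ht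
      exact ⟨x :: p, q, by simp [hpq], hq⟩
    · have hx : x = -1 := by
        rcases List.mem_cons.mp h with h' | h'
        · omega
        · exact absurd h' ht
      exact ⟨[], t, by simp [hx], ht⟩

lemma split_one (xs : List Int) (h : xs.count (-1) = 1) :
    ∃ p q : List Int, xs = p ++ (-1) :: q ∧ (-1 : Int) ∉ p ∧ (-1 : Int) ∉ q ∧
      p.length = xs.idxOf (-1) := by
  induction xs with
  | nil => simp at h
  | cons x t ih =>
    by_cases hx : x = -1
    · subst hx
      have : t.count (-1) = 0 := by simpa [List.count_cons] using h
      exact ⟨[], t, by simp, by simp, by simpa using List.count_eq_zero.mp this, by simp⟩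
    · have ht : t.count (-1) = 1 := by simpa [List.count_cons, hx] using h
      obtain ⟨p, q, hpq, hp, hq, hlen⟩ := ih ht
      refine ⟨x :: p, q, by simp [hpq], ?_, hq, ?_⟩
      · intro hc
        rcases List.mem_cons.mp hc with h' | h'
        · exact hx h'.symm
        · exact hp h'
      have : (x :: t).idxOf (-1) = t.idxOf (-1) + 1 := by
        simp [List.idxOf_cons, hx]
      simp [this, hlen]

-- the getD view of an element of the left part of an append
lemma getD_append_left (p t : List Int) (j : Nat) (hj : j < p.length) (d : Int) :
    (p ++ t).getD j d = p.getD j d := by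
  simp [List.getD_eq_getElem?_getD, List.getElem?_append_left hj]

-- ===== the unchanged part: A = B outside D_ =====
lemma eq_outside (xs : List Int) (hD : ¬ D_getListOfIndex xs) :
    getListOfIndex xs = getListOfIndex_alt xs := by
  rw [A_char, altB]
  rcases Nat.lt_or_ge (xs.count (-1)) 2 with hc2 | hc2
  · rcases Nat.lt_or_ge (xs.count (-1)) 1 with hc1 | hc1
    · -- no -1 at all
      have h0 : xs.count (-1) = 0 := by omega
      exact seg _ _ xs 0 [] 0 0 (fun v hv hveq => by
        exact absurd hv (by simpa [hveq] using List.count_eq_zero.mp h0))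
    · -- exactly one -1
      have h1 : xs.count (-1) = 1 := by omega
      obtain ⟨p, q, hpq, hp, hq, hlen⟩ := split_one xs h1
      have hnd : ∀ i : Nat, i < xs.length → ∀ j : Nat, i < j → j < xs.length →
          xs.getD i 0 = xs.getD j 0 → ¬ (i < xs.idxOf (-1)) := by
        intro i hi j hij hj heq hidx
        exact hD (Or.inr ⟨h1, i, hi, j, hj, hij, heq, hidx⟩)
      -- every element of p is its own last occurrence
      have hplast : ∀ j : Nat, j < p.length →
          p.getD j 0 ≠ -1 ∧ PySem.Dict.getD (lastD xs) (p.getD j 0) 0 = 0 + (j : Int) := by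
        intro j hj
        have hjx : j < xs.length := by
          rw [hpq]; simp; omega
        have hxg : xs.getD j 0 = p.getD j 0 := by rw [hpq]; exact getD_append_left p _ j hj 0
        have hne : p.getD j 0 ≠ -1 := by
          intro hcon
          exact hp (by
            have : p.getD j 0 ∈ p := by simp [List.getD_eq_getElem?_getD, hj]
            rwa [hcon] at this)
        refine ⟨hne, ?_⟩
        rw [← hxg]
        exact (hlast_top xs j hjx (by rw [hxg]; exact hne)).mpr (by
          intro m hm hmx heq
          exact hnd j hjx m hm hmx heq.symm (by omega))
      have hqne : ∀ v ∈ q, v ≠ -1 := fun v hv hveq => hq (hveq ▸ hv)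
      -- the unique -1 has its last occurrence at index p.length
      have hneg : PySem.Dict.getD (lastD xs) (-1) 0 = (p.length : Int) := by
        have := dict_fold_last xs 0 PySem.Dict.empty (-1) p.length
          (by rw [hpq]; simp)
          (by rw [hpq]; exact getD_append_len p q (-1) 0)
          (by
            intro m hm hmx
            rw [hpq] at hmx ⊢
            simp only [List.length_append, List.length_cons] at hmx
            have hm' : m - (p.length + 1) < q.length := by omega
            have : (p ++ (-1) :: q).getD m 0 = q.getD (m - (p.length + 1)) 0 := by
              rw [List.getD_eq_getElem?_getD, List.getElem?_append_right (by omega)]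
              have : m - p.length = (m - (p.length + 1)) + 1 := by omega
              simp [this, List.getD_eq_getElem?_getD]
            rw [this]
            intro hcon
            exact hq (by
              have : q.getD (m - (p.length + 1)) 0 ∈ q := by
                simp [List.getD_eq_getElem?_getD, hm']
              rwa [hcon] at this)
          )
        rw [show lastD xs = (PySem.List.enumerate xs 0).foldl (fun d iv => d.insert iv.2 iv.1) PySem.Dict.empty from rfl]
        rw [this]; ring
      -- unfold the fold along xs = p ++ (-1) :: q
      have henum : PySem.List.enumerate xs 0
          = PySem.List.enumerate p 0
            ++ ((0 : Int) + (p.length : Int), -1) :: PySem.List.enumerate q ((0 : Int) + (p.length : Int) + 1) := by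
        rw [hpq, PySem.List.enumerate_append, PySem.List.enumerate_cons]
      rw [henum, List.foldl_append, List.foldl_append, List.foldl_cons, List.foldl_cons]
      rw [noappC (lastD xs) _ p 0 ([], 0, 0) hplast,
        noappN (lastD xs) p 0 [] (fun j hj => (hplast j hj).2)]
      rw [show stepC (lastD xs) ((xs.count (-1) : Int)) ([], 0, 0) ((0 : Int) + (p.length : Int), -1)
            = ([], 1, 1) from by
          simp [stepC, h1],
        show stepN (lastD xs) [] ((0 : Int) + (p.length : Int), -1) = [] from by
          simp [stepN, hneg]]
      exact seg _ _ q _ [] 1 1 hqne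
  · exact absurd (Or.inl hc2) hD

-- ===== membership lemmas for the exact (tight) part =====
lemma growthC (last : PySem.Dict Int Int) (tn : Int) (t : List (Int × Int)) :
    ∀ (st : List Int × Int × Int) (x : Int), x ∈ st.1 → x ∈ (t.foldl (stepC last tn) st).1 := by
  induction t with
  | nil => intro st x hx; simpa using hx
  | cons iv t ih =>
    intro st x hx
    rw [List.foldl_cons]
    apply ih
    dsimp only [stepC]
    split_ifs <;> simp [hx]

lemma bcomp (last : PySem.Dict Int Int) (tn : Int) (t : List Int) :
    ∀ (s : Int) (st : List Int × Int × Int),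
    ((PySem.List.enumerate t s).foldl (stepC last tn) st).2.2 = st.2.2 + (t.count (-1) : Int) := by
  induction t with
  | nil => intro s st; simp [PySem.List.enumerate_nil]
  | cons x t ih =>
    intro s st
    rw [PySem.List.enumerate_cons, List.foldl_cons, ih (s+1)]
    by_cases hx : x = -1
    · subst hx
      have hstC : (stepC last tn st (s, -1)).2.2 = st.2.2 + 1 := by
        dsimp only [stepC]; rw [if_pos rfl]; split_ifs <;> rfl
      rw [hstC]
      simp only [List.count_cons_self]
      push_cast; ring
    · have : stepC last tn st (s, x) = if PySem.Dict.getD last x 0 ≠ s then (st.1 ++ [s], st.2) else st := by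
        simp [stepC, hx]
      rw [this]
      split_ifs <;> simp [List.count_cons, hx]

lemma ucomp (last : PySem.Dict Int Int) (tn : Int) (t : List Int) :
    ∀ (s : Int) (st : List Int × Int × Int), (-1 : Int) ∉ t →
    ((PySem.List.enumerate t s).foldl (stepC last tn) st).2.1 = st.2.1 := by
  induction t with
  | nil => intro s st _; simp [PySem.List.enumerate_nil]
  | cons x t ih =>
    intro s st hx
    have hx1 : x ≠ -1 := fun h => hx (h ▸ List.mem_cons_self)
    rw [PySem.List.enumerate_cons, List.foldl_cons, ih (s+1) _ (fun h => hx (List.mem_cons_of_mem _ h))]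
    have : stepC last tn st (s, x) = if PySem.Dict.getD last x 0 ≠ s then (st.1 ++ [s], st.2) else st := by
      simp [stepC, hx1]
    rw [this]
    split_ifs <;> rfl

lemma invC (last : PySem.Dict Int Int) (tn : Int) (t : List (Int × Int)) :
    ∀ (st : List Int × Int × Int),
    (st.2.2 ≤ (st.1.length : Int) + st.2.1) →
    ((t.foldl (stepC last tn) st).2.2 ≤ ((t.foldl (stepC last tn) st).1.length : Int) + (t.foldl (stepC last tn) st).2.1) := by
  induction t with
  | nil => intro st h; simpa using h
  | cons iv t ih =>
    intro st h
    rw [List.foldl_cons]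
    apply ih
    dsimp only [stepC]
    split_ifs
    all_goals try simp only [List.length_append, List.length_cons, List.length_nil]
    all_goals push_cast
    all_goals omega

-- an index appended on a -1-free segment stays in the result
lemma memC_pos (last : PySem.Dict Int Int) (tn : Int) (t : List Int) :
    ∀ (s : Int) (st : List Int × Int × Int) (j : Nat), j < t.length →
    t.getD j 0 ≠ -1 → PySem.Dict.getD last (t.getD j 0) 0 ≠ s + (j : Int) →
    (s + (j : Int)) ∈ ((PySem.List.enumerate t s).foldl (stepC last tn) st).1 := by
  induction t with
  | nil => intro s st j hj; simp at hj
  | cons x t ih =>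
    intro s st j hj hne hgd
    rw [PySem.List.enumerate_cons, List.foldl_cons]
    cases j with
    | zero =>
      simp only [List.getD_cons_zero] at hne hgd
      simp only [Nat.cast_zero, add_zero] at hgd ⊢
      have : stepC last tn st (s, x) = (st.1 ++ [s], st.2) := by
        simp [stepC, hne, hgd]
      rw [this]
      exact growthC last tn _ _ s (by simp)
    | succ j =>
      simp only [List.getD_cons_succ] at hne hgd
      have : s + ((j + 1 : Nat) : Int) = (s + 1) + (j : Int) := by push_cast; ring
      rw [this]
      exact ih (s+1) _ j (by simpa using hj) hne (by rw [← this]; exact hgd)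

lemma memN_char (last : PySem.Dict Int Int) (t : List (Int × Int)) :
    ∀ (r : List Int) (x : Int), x ∈ t.foldl (stepN last) r →
      x ∈ r ∨ ∃ iv ∈ t, iv.1 = x ∧ PySem.Dict.getD last iv.2 0 ≠ iv.1 := by
  induction t with
  | nil => intro r x hx; simpa using hx
  | cons iv t ih =>
    intro r x hx
    rw [List.foldl_cons] at hx
    rcases ih _ x hx with h | ⟨iv', hmem, h1, h2⟩
    · dsimp only [stepN] at h
      by_cases hc : PySem.Dict.getD last iv.2 0 ≠ iv.1
      · rw [if_pos hc] at h
        rcases List.mem_append.mp h with h | h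
        · exact Or.inl h
        · exact Or.inr ⟨iv, List.mem_cons_self, by simp at h; exact h.symm, hc⟩
      · rw [if_neg hc] at h
        exact Or.inl h
    · exact Or.inr ⟨iv', List.mem_cons_of_mem _ hmem, h1, h2⟩

lemma idxOf_split (p q : List Int) (hp : (-1 : Int) ∉ p) :
    (p ++ (-1) :: q).idxOf (-1) = p.length := by
  induction p with
  | nil => simp
  | cons x p ih =>
    have hx : x ≠ -1 := fun h => hp (h ▸ List.mem_cons_self)
    have := ih (fun h => hp (List.mem_cons_of_mem _ h))
    simp [List.idxOf_cons, hx, this]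

-- ===== the exact part: inside D_, A and B really differ =====
lemma ne_inside (xs : List Int) (hD : D_getListOfIndex xs) :
    getListOfIndex xs ≠ getListOfIndex_alt xs := by
  have hmem : (-1 : Int) ∈ xs := by
    rcases hD with h | ⟨h, _⟩
    · exact List.count_pos_iff.mp (by omega)
    · exact List.count_pos_iff.mp (by omega)
  obtain ⟨p, q, hpq, hq⟩ := split_last xs hmem
  -- the last -1 sits at index p.length; its last-occurrence entry is itself
  have hneg : PySem.Dict.getD (lastD xs) (-1) 0 = (p.length : Int) := by
    have := dict_fold_last xs 0 PySem.Dict.empty (-1) p.length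
      (by rw [hpq]; simp)
      (by rw [hpq]; exact getD_append_len p q (-1) 0)
      (by
        intro m hm hmx
        rw [hpq] at hmx ⊢
        simp only [List.length_append, List.length_cons] at hmx
        have hm' : m - (p.length + 1) < q.length := by omega
        have : (p ++ (-1) :: q).getD m 0 = q.getD (m - (p.length + 1)) 0 := by
          rw [List.getD_eq_getElem?_getD, List.getElem?_append_right (by omega)]
          have : m - p.length = (m - (p.length + 1)) + 1 := by omega
          simp [this, List.getD_eq_getElem?_getD]
        rw [this]
        intro hcon
        exact hq (by
          have : q.getD (m - (p.length + 1)) 0 ∈ q := by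
            simp [List.getD_eq_getElem?_getD, hm']
          rwa [hcon] at this))
    rw [show lastD xs = (PySem.List.enumerate xs 0).foldl (fun d iv => d.insert iv.2 iv.1) PySem.Dict.empty from rfl]
    rw [this]; ring
  -- B never returns index p.length
  have hBnot : ((p.length : Int)) ∉ getListOfIndex_alt xs := by
    rw [altB]
    intro hcon
    rcases memN_char (lastD xs) _ [] _ hcon with h | ⟨iv, hiv, h1, h2⟩
    · simp at h
    · obtain ⟨k, hk, hkv⟩ := (PySem.List.mem_enumerate_iff _ _ _).mp hiv
      have hk1 : iv.1 = 0 + (k : Int) := by rw [hkv]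
      have hkp : k = p.length := by
        rw [h1] at hk1
        omega
      have hv : iv.2 = -1 := by
        have h9 : xs[k]? = some (-1) := by
          rw [hpq, List.getElem?_append_right (by omega)]
          simp [hkp]
        have h10 := List.getElem?_eq_getElem hk
        rw [h9] at h10
        rw [hkv]
        exact (Option.some.inj h10).symm
      rw [hv, hneg, h1] at h2
      rw [h1] at hk1
      omega
  -- A does return index p.length
  have hAmem : ((p.length : Int)) ∈ getListOfIndex xs := by
    rw [A_char]
    have henum : PySem.List.enumerate xs 0
        = PySem.List.enumerate p 0
          ++ ((0 : Int) + (p.length : Int), -1) :: PySem.List.enumerate q ((0 : Int) + (p.length : Int) + 1) := by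
      rw [hpq, PySem.List.enumerate_append, PySem.List.enumerate_cons]
    rw [henum, List.foldl_append, List.foldl_cons]
    set last := lastD xs
    set tn := ((xs.count (-1) : Int)) with htn
    set st0 := (PySem.List.enumerate p 0).foldl (stepC last tn) ([], 0, 0) with hst0
    have hb0 : st0.2.2 = (p.count (-1) : Int) := by
      rw [hst0, bcomp]; simp
    have hinv : st0.2.2 ≤ (st0.1.length : Int) + st0.2.1 := by
      rw [hst0]
      exact invC last tn _ ([], 0, 0) (by simp)
    have htn' : tn = (p.count (-1) : Int) + 1 := by
      rw [htn, hpq]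
      have hq0 : q.count (-1) = 0 := List.count_eq_zero.mpr hq
      simp [List.count_append, List.count_cons, hq0]
    -- the append condition at the last -1 holds in both D_ cases
    have hcond : PySem.List.len st0.1 + st0.2.1 + (tn - st0.2.2) > 1 := by
      rw [PySem.List.len_eq]
      have hdiff : tn - st0.2.2 = 1 := by rw [htn', hb0]; ring
      rw [hdiff]
      rcases hD with h | ⟨h1, i, hi, j, hj, hij, heq, hidx⟩
      · -- at least two -1s: p contains one
        have hq0 : q.count (-1) = 0 := List.count_eq_zero.mpr hq
        have hpc : 1 ≤ p.count (-1) := by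
          have hxc : xs.count (-1) = p.count (-1) + (q.count (-1) + 1) := by
            rw [hpq]; simp [List.count_append]
          omega
        have hb1 : (1 : Int) ≤ st0.2.2 := by rw [hb0]; exact_mod_cast hpc
        have := le_trans hb1 hinv
        linarith [Int.natCast_nonneg st0.1.length]
      · -- one -1, and a duplicated value before it: something was appended over p
        have hp0 : (-1 : Int) ∉ p := by
          intro hcon
          rw [hpq] at h1
          have := List.count_pos_iff.mpr hcon
          simp [List.count_append, List.count_cons] at h1
          omega
        have hpc : p.count (-1) = 0 := List.count_eq_zero.mpr hp0
        have hu0 : st0.2.1 = 0 := by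
          rw [hst0, ucomp last tn p 0 ([], 0, 0) hp0]
        have hidxp : xs.idxOf (-1) = p.length := by
          rw [hpq]; exact idxOf_split p q hp0
        have hip : i < p.length := by omega
        have hxg : xs.getD i 0 = p.getD i 0 := by
          rw [hpq]; exact getD_append_left p _ i hip 0
        have hne : xs.getD i 0 ≠ -1 := by
          rw [hxg]
          intro hcon
          exact hp0 (by
            have : p.getD i 0 ∈ p := by simp [List.getD_eq_getElem?_getD, hip]
            rwa [hcon] at this)
        have hgd : PySem.Dict.getD (lastD xs) (xs.getD i 0) 0 ≠ (0 : Int) + (i : Int) := by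
          intro hcon
          exact (hlast_top xs i hi hne).mp hcon j hij hj heq.symm
        have hmemp : ((0 : Int) + (i : Int)) ∈ st0.1 := by
          rw [hst0]
          exact memC_pos last tn p 0 ([], 0, 0) i hip
            (by rw [← hxg]; exact hne) (by rw [← hxg]; exact hgd)
        have hlen : 1 ≤ st0.1.length := List.length_pos_iff.mpr (List.ne_nil_of_mem hmemp)
        have hlen' : (1 : Int) ≤ (st0.1.length : Int) := by exact_mod_cast hlen
        rw [hu0]
        linarith
    have hstep : stepC last tn st0 ((0 : Int) + (p.length : Int), -1)
        = (st0.1 ++ [(0 : Int) + (p.length : Int)], st0.2.1, st0.2.2 + 1) := by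
      dsimp only [stepC]
      rw [if_pos rfl, if_pos hcond]
    rw [hstep]
    apply growthC
    simp
  intro hcon
  rw [hcon] at hAmem
  exact hBnot hAmem

-- ===== VERDICT (by name: the statement is the Claim_ definition above) =====
theorem getListOfIndex_spec : Claim_unchanged_getListOfIndex := by
  intro xs _ hD
  exact eq_outside xs hD

theorem getListOfIndex_changed : Claim_changed_getListOfIndex := by
  unfold Claim_changed_getListOfIndex
  refine ⟨by decide, by decide, by decide, by decide, by decide⟩

theorem getListOfIndex_tight : Claim_exact_getListOfIndex := by
  intro xs _ hD
  exact ne_inside xs hD
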